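-- pv_equiv track=rewrite | github.com/Indzagi/hillel_python_learning | python_homework_11/python_homework_11_2.py | generate_cube_numbers
-- ===== SOURCE A (Python) =====
-- from typing import Generator
--
-- def generate_cube_numbers(end: int) -> Generator[int, None, None]:
--     """
--     Function return n + 1 cubed started with 2 end ended
--     to the parameter
--     :param end: int param which limits numbers
--     :return: value that is less than parameter
--     """
--     value = 2
--     result = value
--     while result < end:
--         result = value ** 3
--         if result <= end:
--             yield result
--         else:
--             return
--         value += 1
-- ===== SOURCE B (Python) =====
-- def generate_cube_numbers(end):
--     # Closed-form count: find n = integer cube root of end by doubling + bisection,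
--     # then emit the cubes 2**3 .. n**3 with no per-cube comparison against end.
--     if end < 8:
--         return
--     hi = 1
--     while hi ** 3 <= end:
--         hi = 2 * hi
--     lo = 1
--     while lo + 1 < hi:
--         mid = (lo + hi) // 2
--         if mid ** 3 <= end:
--             lo = mid
--         else:
--             hi = mid
--     for v in range(2, lo + 1):
--         yield v ** 3
-- ===== Notes on version B (the rewrite author's own statement) =====
-- stated objective: alternative
-- what changed: B computes the integer cube root of end once (doubling + bisection) and then yields the cubes over a flat range, instead of A's scan that cubes each value and compares it with end before every yield.
import Mathlib
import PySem

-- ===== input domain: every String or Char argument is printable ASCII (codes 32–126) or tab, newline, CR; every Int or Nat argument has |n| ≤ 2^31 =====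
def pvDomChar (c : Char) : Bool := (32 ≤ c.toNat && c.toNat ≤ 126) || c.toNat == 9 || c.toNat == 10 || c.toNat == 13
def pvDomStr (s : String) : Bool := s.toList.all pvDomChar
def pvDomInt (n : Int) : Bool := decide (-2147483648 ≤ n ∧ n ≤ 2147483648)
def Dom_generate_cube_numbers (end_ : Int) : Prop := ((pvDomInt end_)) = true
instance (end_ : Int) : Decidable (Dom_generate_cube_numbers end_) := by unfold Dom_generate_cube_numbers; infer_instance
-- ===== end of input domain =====

-- B replaces A's cube-and-compare scan with one integer cube root (doubling + bisection)
-- followed by a flat range of cubes; same yielded values (both ports list the yields).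
-- The Nat fuel arguments are totality guards only; fuel sufficiency is proved in the lemmas.

-- ===== PORT A =====
-- A's while loop: state (value, result); each yielded cube is consed onto the output.
def pvLoopA (fuel : Nat) (end_ value result : Int) : List Int :=
  match fuel with
  | 0 => []
  | fuel + 1 =>
    if result < end_ then
      let r := value ^ 3
      if r ≤ end_ then r :: pvLoopA fuel end_ (value + 1) r else []
    else []

def generate_cube_numbers (end_ : Int) : List Int :=
  pvLoopA (end_.toNat + 1) end_ 2 2

-- ===== PORT B =====
-- B's first loop: double hi until hi**3 > end
def pvHiLoop (fuel : Nat) (end_ hi : Int) : Int :=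
  match fuel with
  | 0 => hi
  | fuel + 1 => if hi ^ 3 ≤ end_ then pvHiLoop fuel end_ (2 * hi) else hi

-- B's second loop: bisection for the largest lo with lo**3 <= end
def pvBiLoop (fuel : Nat) (end_ lo hi : Int) : Int :=
  match fuel with
  | 0 => lo
  | fuel + 1 =>
    if lo + 1 < hi then
      let mid := PySem.Int.floordiv (lo + hi) 2
      if mid ^ 3 ≤ end_ then pvBiLoop fuel end_ mid hi else pvBiLoop fuel end_ lo mid
    else lo

def generate_cube_numbers_alt (end_ : Int) : List Int :=
  if end_ < 8 then []
  else
    let hi := pvHiLoop end_.toNat end_ 1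
    let lo := pvBiLoop (2 * end_).toNat end_ 1 hi
    (PySem.List.pyRange 2 (lo + 1) 1).map (fun v => v ^ 3)

-- ===== PRECONDITION & SPEC =====
def Spec_generate_cube_numbers (end_ : Int) (out : List Int) : Prop := out = generate_cube_numbers_alt end_
instance (end_ : Int) (out : List Int) : Decidable (Spec_generate_cube_numbers end_ out) := by unfold Spec_generate_cube_numbers; infer_instance

-- ===== CLAIM (what is proved, stated in full; the proofs are below) =====
def Claim_equal_generate_cube_numbers : Prop := ∀ (end_ : Int), Dom_generate_cube_numbers end_ → Spec_generate_cube_numbers end_ (generate_cube_numbers end_)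

-- ===== LEMMAS AND PROOFS =====

lemma le_cube {a : Int} (h : 1 ≤ a) : a ≤ a ^ 3 := by
  have h2 : 0 ≤ (a - 1) * a * (a + 1) :=
    mul_nonneg (mul_nonneg (by omega) (by omega)) (by omega)
  nlinarith [h2]

lemma cube_lt_cube {a b : Int} (h : a ^ 3 < b ^ 3) : a < b :=
  ((Odd.strictMono_pow (by norm_num : Odd 3)).lt_iff_lt).mp h

lemma cube_le_cube {a b : Int} (h : a ^ 3 ≤ b ^ 3) : a ≤ b :=
  ((Odd.strictMono_pow (by norm_num : Odd 3)).le_iff_le).mp h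

-- doubling loop: with enough fuel the result hi' satisfies end_ < hi'^3, hi ≤ hi' ≤ 2*end_
lemma pvHiLoop_spec (end_ : Int) : ∀ (fuel : Nat) (hi : Int), 1 ≤ hi → hi ≤ 2 * end_ →
    (end_ + 1 - hi).toNat ≤ fuel →
    end_ < (pvHiLoop fuel end_ hi) ^ 3 ∧ hi ≤ pvHiLoop fuel end_ hi ∧
      pvHiLoop fuel end_ hi ≤ 2 * end_ := by
  intro fuel
  induction fuel with
  | zero =>
    intro hi h1 h2 hf
    have hc := le_cube h1
    simp only [pvHiLoop]
    omega
  | succ fuel ih =>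
    intro hi h1 h2 hf
    simp only [pvHiLoop]
    split_ifs with hle
    · have hhe : hi ≤ end_ := le_trans (le_cube h1) hle
      have := ih (2 * hi) (by omega) (by omega) (by omega)
      exact ⟨this.1, by omega, this.2.2⟩
    · exact ⟨by omega, le_refl _, h2⟩

-- bisection: keeps lo^3 ≤ end_ < hi^3 and narrows to the exact cube root
lemma pvBiLoop_spec (end_ : Int) : ∀ (fuel : Nat) (lo hi : Int), 1 ≤ lo → lo < hi →
    lo ^ 3 ≤ end_ → end_ < hi ^ 3 → (hi - lo).toNat ≤ fuel →
    1 ≤ pvBiLoop fuel end_ lo hi ∧ (pvBiLoop fuel end_ lo hi) ^ 3 ≤ end_ ∧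
      end_ < (pvBiLoop fuel end_ lo hi + 1) ^ 3 := by
  intro fuel
  induction fuel with
  | zero => intro lo hi h1 h2 h3 h4 hf; omega
  | succ fuel ih =>
    intro lo hi h1 h2 h3 h4 hf
    have hb := PySem.Int.floordiv_two_mid_bounds (lo := lo) (hi := hi) (by omega)
    have he : PySem.Int.floordiv (lo + hi) 2 = (lo + hi) / 2 :=
      PySem.Int.floordiv_eq_ediv_of_pos (by norm_num)
    simp only [pvBiLoop]
    split_ifs with hlt hmid
    · exact ih _ _ (by omega) (by omega) hmid h4 (by omega)
    · exact ih _ _ h1 (by omega) h3 (by omega) (by omega)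
    · refine ⟨h1, h3, ?_⟩
      rw [show lo + 1 = hi by omega]
      exact h4
-- A's loop lists exactly the cubes of 2..n for the cube root n, given enough fuel
lemma pvLoopA_eq (end_ n : Int) (hn : n ^ 3 ≤ end_) (hn1 : end_ < (n + 1) ^ 3) :
    ∀ (fuel : Nat) (v r : Int), 2 ≤ v → (r < end_ ∨ n < v) → (n + 2 - v).toNat ≤ fuel →
    pvLoopA fuel end_ v r = (PySem.List.pyRange v (n + 1) 1).map (fun k => k ^ 3) := by
  intro fuel
  induction fuel with
  | zero =>
    intro v r hv hcond hf
    have hnv : n < v := by omega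
    rw [PySem.List.pyRange_one_eq_nil (by omega)]
    simp [pvLoopA]
  | succ fuel ih =>
    intro v r hv hcond hf
    simp only [pvLoopA]
    split_ifs with hlt hle
    · -- v^3 ≤ end_, so v ≤ n: one more cube, then recurse
      have hvn : v < n + 1 := cube_lt_cube (by omega)
      have hcond' : v ^ 3 < end_ ∨ n < v + 1 := by
        by_cases hc : v ^ 3 < end_
        · exact Or.inl hc
        · have hnv : n ≤ v := cube_le_cube (by omega)
          exact Or.inr (by omega)
      rw [PySem.List.pyRange_one_cons (by omega), List.map_cons,
          ih (v + 1) (v ^ 3) (by omega) hcond' (by omega)]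
    · -- end_ < v^3, so n < v: nothing left
      have hnv : n < v := cube_lt_cube (by omega)
      rw [PySem.List.pyRange_one_eq_nil (by omega)]
      simp
    · have hnv : n < v := by omega
      rw [PySem.List.pyRange_one_eq_nil (by omega)]
      simp

-- ===== VERDICT (by name: the statement is the Claim_ definition above) =====
theorem generate_cube_numbers_spec : Claim_equal_generate_cube_numbers := by
  intro e _
  show generate_cube_numbers e = generate_cube_numbers_alt e
  unfold generate_cube_numbers generate_cube_numbers_alt
  by_cases h8 : e < 8
  · rw [if_pos h8]
    simp only [pvLoopA]
    norm_num
    intro _ h2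
    omega
  · rw [if_neg h8]
    have hhi := pvHiLoop_spec e e.toNat 1 (by norm_num) (by omega) (by omega)
    set hi := pvHiLoop e.toNat e 1 with hhidef
    have hhi1 : (1:Int) < hi := by
      have h2 := cube_lt_cube (a := 1) (b := hi) (by norm_num; omega)
      omega
    have hbi := pvBiLoop_spec e (2 * e).toNat 1 hi (le_refl 1) hhi1
      (by norm_num; omega) hhi.1 (by omega)
    set n := pvBiLoop (2 * e).toNat e 1 hi with hn
    have hn2 : 2 ≤ n := by
      have : (2:Int) < n + 1 := cube_lt_cube (by norm_num; omega)
      omega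
    have hne : n ≤ e := le_trans (le_cube (by omega)) hbi.2.1
    exact pvLoopA_eq e n hbi.2.1 hbi.2.2 (e.toNat + 1) 2 2 (by norm_num)
      (Or.inl (by omega)) (by omega)
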